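-- pv_equiv track=rewrite | github.com/jsong0727/Fall2022_DataStructuresAlgo | Midterm/p5.py | getStartOfEachValues
-- ===== SOURCE A (Python) =====
-- def getStartOfEachValues(array, values):
--     res = []
--     if len(array) == 0 or len(values) == 0:
--         return res
--
--     for value in values:
--         left = 0
--         right = len(array)-1
--         while left < right:
--             middle = (left + right) // 2
--             if array[middle] < value:
--                 left = middle + 1
--             else:
--                 right = middle
--         if array[left] != value:
--             res.append(-1)
--         else:
--             res.append(left)
--     return res
-- ===== SOURCE B (Python) =====
-- def getStartOfEachValues(array, values):
--     if not array or not values: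
--         return []
--
--     def locate(value):
--         def find(lo, hi):
--             if lo >= hi:
--                 return lo
--             mid = (lo + hi) // 2
--             if array[mid] < value:
--                 return find(mid + 1, hi)
--             return find(lo, mid)
--
--         left = find(0, len(array) - 1)
--         return left if array[left] == value else -1
--
--     return [locate(v) for v in values]
-- ===== Notes on version B (the rewrite author's own statement) =====
-- stated objective: alternative
-- what changed: Replaces the iterative while-loop binary search and the append-accumulating outer loop by a recursive find(lo,hi) helper wrapped in a per-value locate and a list comprehension over values.
import Mathlib
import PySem

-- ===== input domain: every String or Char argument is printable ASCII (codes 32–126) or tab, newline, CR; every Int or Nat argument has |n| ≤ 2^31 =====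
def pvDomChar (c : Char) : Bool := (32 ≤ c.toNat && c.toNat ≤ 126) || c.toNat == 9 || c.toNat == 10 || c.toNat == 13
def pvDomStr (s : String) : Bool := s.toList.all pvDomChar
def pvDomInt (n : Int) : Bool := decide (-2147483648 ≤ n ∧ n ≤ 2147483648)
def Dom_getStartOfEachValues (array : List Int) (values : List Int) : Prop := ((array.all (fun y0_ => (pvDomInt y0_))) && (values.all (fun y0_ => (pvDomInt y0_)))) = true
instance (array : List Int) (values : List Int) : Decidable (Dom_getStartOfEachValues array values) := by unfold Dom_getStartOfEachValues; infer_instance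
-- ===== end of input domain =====

-- B: recursive binary search + per-value locate + map, instead of A's iterative while loop with an appending fold; same results.


-- ===== PORT A =====
-- literal port of A's while-loop binary search; array[middle] is always in range here
def pvLoopA (array : List Int) (value left right : Int) : Int :=
  if h : left < right then
    let middle := PySem.Int.floordiv (left + right) 2
    if (PySem.List.pyGet? array middle).getD 0 < value then
      pvLoopA array value (middle + 1) right
    else
      pvLoopA array value left middle
  else left
termination_by (right - left).toNat
decreasing_by
  · have h1 :=
      (PySem.Int.le_floordiv_iff_mul_le (a := left + right) (q := left)
        (by norm_num : (0:Int) < 2)).mpr (by omega)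
    omega
  · have h2 :=
      (PySem.Int.floordiv_lt_iff_lt_mul (a := left + right) (q := right)
        (by norm_num : (0:Int) < 2)).mpr (by omega)
    omega

def getStartOfEachValues (array : List Int) (values : List Int) : List Int :=
  if array.length = 0 ∨ values.length = 0 then []
  else
    values.foldl
      (fun res value =>
        let left := pvLoopA array value 0 (array.length - 1)
        if (PySem.List.pyGet? array left).getD 0 ≠ value then res ++ [-1]
        else res ++ [left])
      []

-- ===== PORT B =====
-- literal port of B's recursive find / locate / comprehension
def pvFindB (array : List Int) (value lo hi : Int) : Int :=
  if h : lo ≥ hi then lo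
  else
    let mid := PySem.Int.floordiv (lo + hi) 2
    if (PySem.List.pyGet? array mid).getD 0 < value then
      pvFindB array value (mid + 1) hi
    else
      pvFindB array value lo mid
termination_by (hi - lo).toNat
decreasing_by
  · have h1 :=
      (PySem.Int.le_floordiv_iff_mul_le (a := lo + hi) (q := lo)
        (by norm_num : (0:Int) < 2)).mpr (by omega)
    omega
  · have h2 :=
      (PySem.Int.floordiv_lt_iff_lt_mul (a := lo + hi) (q := hi)
        (by norm_num : (0:Int) < 2)).mpr (by omega)
    omega

def pvLocate (array : List Int) (value : Int) : Int :=
  let left := pvFindB array value 0 (array.length - 1)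
  if (PySem.List.pyGet? array left).getD 0 = value then left else -1

def getStartOfEachValues_alt (array : List Int) (values : List Int) : List Int :=
  if array = [] ∨ values = [] then []
  else values.map (pvLocate array)

-- ===== PRECONDITION & SPEC =====
def Spec_getStartOfEachValues (array : List Int) (values : List Int) (out : List Int) : Prop := out = getStartOfEachValues_alt array values
instance (array : List Int) (values : List Int) (out : List Int) : Decidable (Spec_getStartOfEachValues array values out) := by unfold Spec_getStartOfEachValues; infer_instance

-- ===== CLAIM (what is proved, stated in full; the proofs are below) =====
def Claim_equal_getStartOfEachValues : Prop := ∀ (array : List Int) (values : List Int), Dom_getStartOfEachValues array values → Spec_getStartOfEachValues array values (getStartOfEachValues array values)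

-- ===== LEMMAS AND PROOFS =====

theorem pvLoop_eq_find (array : List Int) (value left right : Int) :
    pvLoopA array value left right = pvFindB array value left right := by
  fun_induction pvLoopA array value left right with
  | case1 l r h m hlt ih =>
      rw [pvFindB, dif_neg (by omega : ¬ l ≥ r)]
      simp only [← show m = PySem.Int.floordiv (l + r) 2 from rfl, if_pos hlt]
      exact ih
  | case2 l r h m hlt ih =>
      rw [pvFindB, dif_neg (by omega : ¬ l ≥ r)]
      simp only [← show m = PySem.Int.floordiv (l + r) 2 from rfl, if_neg hlt]
      exact ih
  | case3 l r h =>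
      rw [pvFindB, dif_pos (by omega : l ≥ r)]

theorem pvFold_eq_map (array : List Int) (values : List Int) (acc : List Int) :
    values.foldl
      (fun res value =>
        let left := pvLoopA array value 0 (array.length - 1)
        if (PySem.List.pyGet? array left).getD 0 ≠ value then res ++ [-1]
        else res ++ [left]) acc
    = acc ++ values.map (pvLocate array) := by
  induction values generalizing acc with
  | nil => simp
  | cons v vs ih =>
      rw [List.foldl_cons, ih, List.map_cons]
      have hstep :
          (if (PySem.List.pyGet? array (pvLoopA array v 0 (array.length - 1))).getD 0 ≠ v
             then acc ++ [-1]
             else acc ++ [pvLoopA array v 0 (array.length - 1)])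
            = acc ++ [pvLocate array v] := by
        simp only [pvLocate, pvLoop_eq_find]
        by_cases h :
            (PySem.List.pyGet? array (pvFindB array v 0 (↑array.length - 1))).getD 0 = v <;>
          simp [h]
      simp only [hstep, List.append_assoc, List.singleton_append]

-- ===== VERDICT (by name: the statement is the Claim_ definition above) =====
theorem getStartOfEachValues_spec : Claim_equal_getStartOfEachValues := by
  intro array values _
  unfold Spec_getStartOfEachValues getStartOfEachValues getStartOfEachValues_alt
  rw [pvFold_eq_map]
  simp [List.length_eq_zero_iff]
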